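-- pv_equiv track=rewrite | github.com/lixsh6/WSDM2022-CNIR | utils.py | get_raw_text
-- ===== SOURCE A (Python) =====
-- def get_raw_text(raw_query_batch,cand_batch,id2word):
--     new_query_batch = []
--     local_batch_size = len(raw_query_batch)#len(cand_batch) / num_repeat
--     for i in range(len(cand_batch)):
--         query_index = i % local_batch_size
--         new_query_idx = list(raw_query_batch[query_index]) + list(cand_batch[i])
--         new_query = []
--         for idx in new_query_idx:
--             #remove the padding token
--             if idx != 0 and idx in id2word:
--                 new_query.append(idx)
--         new_query_batch.append(new_query)
--     return new_query_batch
-- ===== SOURCE B (Python) =====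
-- def get_raw_text(raw_query_batch, cand_batch, id2word):
--     # pre-filter each query row once, then index by i % batch size
--     filtered_queries = [[idx for idx in list(q) if idx != 0 and idx in id2word]
--                         for q in raw_query_batch]
--     return [filtered_queries[i % len(raw_query_batch)]
--             + [idx for idx in list(cand_batch[i]) if idx != 0 and idx in id2word]
--             for i in range(len(cand_batch))]
-- ===== Notes on version B (the rewrite author's own statement) =====
-- stated objective: alternative
-- what changed: B pre-filters every query row once into a table and builds the output as a comprehension of table-lookup + filtered candidate, instead of re-filtering the concatenated query+candidate list with an accumulator loop inside every candidate iteration.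
import Mathlib
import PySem

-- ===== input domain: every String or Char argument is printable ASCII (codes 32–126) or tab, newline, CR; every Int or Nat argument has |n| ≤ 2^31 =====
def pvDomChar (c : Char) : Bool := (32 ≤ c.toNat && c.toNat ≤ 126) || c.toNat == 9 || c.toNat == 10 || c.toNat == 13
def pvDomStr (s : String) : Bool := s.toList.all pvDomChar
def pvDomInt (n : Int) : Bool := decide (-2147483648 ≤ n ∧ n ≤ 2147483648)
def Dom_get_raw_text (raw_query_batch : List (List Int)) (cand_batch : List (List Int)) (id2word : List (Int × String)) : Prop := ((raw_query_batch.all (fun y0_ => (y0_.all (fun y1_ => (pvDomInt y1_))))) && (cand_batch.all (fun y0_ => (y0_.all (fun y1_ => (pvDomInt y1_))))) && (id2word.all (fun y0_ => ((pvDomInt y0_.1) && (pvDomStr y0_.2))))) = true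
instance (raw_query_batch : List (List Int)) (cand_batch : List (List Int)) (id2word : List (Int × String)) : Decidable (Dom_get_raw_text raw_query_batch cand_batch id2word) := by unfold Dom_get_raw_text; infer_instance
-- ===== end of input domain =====

-- B pre-filters each query row once into a table and assembles each output row by lookup + filtered candidate (same results, different decomposition).


-- 'idx in id2word' on the dict: membership among the keys
def pvKeep (id2word : List (Int × String)) (idx : Int) : Bool :=
  idx != 0 && id2word.any (fun kv => kv.1 == idx)

-- ===== PORT A =====
def get_raw_text (raw_query_batch : List (List Int)) (cand_batch : List (List Int)) (id2word : List (Int × String)) : List (List Int) :=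
  let local_batch_size : Int := raw_query_batch.length
  (PySem.List.pyRange 0 cand_batch.length 1).foldl (fun new_query_batch i =>
    let query_index := PySem.Int.mod i local_batch_size
    let new_query_idx := (PySem.List.pyGet? raw_query_batch query_index).getD []
                         ++ (PySem.List.pyGet? cand_batch i).getD []
    let new_query := new_query_idx.foldl (fun nq idx =>
      if pvKeep id2word idx then nq ++ [idx] else nq) []
    new_query_batch ++ [new_query]) []

-- ===== PORT B =====
def get_raw_text_alt (raw_query_batch : List (List Int)) (cand_batch : List (List Int)) (id2word : List (Int × String)) : List (List Int) :=
  let filtered_queries := raw_query_batch.map (fun q => q.filter (pvKeep id2word))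
  (PySem.List.pyRange 0 cand_batch.length 1).map (fun i =>
    (PySem.List.pyGet? filtered_queries (PySem.Int.mod i raw_query_batch.length)).getD []
    ++ ((PySem.List.pyGet? cand_batch i).getD []).filter (pvKeep id2word))

-- ===== PRECONDITION & SPEC =====
-- Pre_ excludes exactly the inputs where A raises ZeroDivisionError (empty query batch with a nonempty candidate batch); B raises there too.
def Pre_get_raw_text (raw_query_batch : List (List Int)) (cand_batch : List (List Int)) (id2word : List (Int × String)) : Prop :=
  raw_query_batch ≠ [] ∨ cand_batch = []
instance (raw_query_batch : List (List Int)) (cand_batch : List (List Int)) (id2word : List (Int × String)) : Decidable (Pre_get_raw_text raw_query_batch cand_batch id2word) := by unfold Pre_get_raw_text; infer_instance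
def pvWitness_get_raw_text : List (List Int) × List (List Int) × (List (Int × String)) :=
  ([[1, 0, 2]], [[2, 3], [0, 1]], [(1, "a"), (2, "b")])

def Spec_get_raw_text (raw_query_batch : List (List Int)) (cand_batch : List (List Int)) (id2word : List (Int × String)) (out : List (List Int)) : Prop := out = get_raw_text_alt raw_query_batch cand_batch id2word
instance (raw_query_batch : List (List Int)) (cand_batch : List (List Int)) (id2word : List (Int × String)) (out : List (List Int)) : Decidable (Spec_get_raw_text raw_query_batch cand_batch id2word out) := by unfold Spec_get_raw_text; infer_instance

-- ===== CLAIM (what is proved, stated in full; the proofs are below) =====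
def Claim_equal_get_raw_text : Prop := ∀ (raw_query_batch : List (List Int)) (cand_batch : List (List Int)) (id2word : List (Int × String)), Dom_get_raw_text raw_query_batch cand_batch id2word → Pre_get_raw_text raw_query_batch cand_batch id2word → Spec_get_raw_text raw_query_batch cand_batch id2word (get_raw_text raw_query_batch cand_batch id2word)

-- ===== LEMMAS AND PROOFS =====

-- per-index equality of the two loop bodies, for a nonempty query batch
theorem pv_body_eq (q c : List (List Int)) (d : List (Int × String)) (hq : q ≠ [])
    (i : Int) :
    (((PySem.List.pyGet? q (PySem.Int.mod i q.length)).getD []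
       ++ (PySem.List.pyGet? c i).getD []).foldl (fun nq idx =>
         if pvKeep d idx then nq ++ [idx] else nq) [])
    = (PySem.List.pyGet? (q.map (fun x => x.filter (pvKeep d))) (PySem.Int.mod i q.length)).getD []
      ++ ((PySem.List.pyGet? c i).getD []).filter (pvKeep d) := by
  have hn : (0 : Int) < q.length := by
    have := List.length_pos_iff.mpr hq; exact_mod_cast this
  have h0 : (0 : Int) ≤ PySem.Int.mod i q.length := PySem.Int.mod_nonneg _ hn
  have hlt : PySem.Int.mod i q.length < q.length := PySem.Int.mod_lt _ hn
  rw [PySem.List.foldl_append_if_eq_filter, List.filter_append, List.nil_append]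
  congr 1
  rw [PySem.List.pyGet?_of_nonneg _ h0, PySem.List.pyGet?_of_nonneg _ h0, List.getElem?_map]
  have hklt : (PySem.Int.mod i q.length).toNat < q.length := by omega
  simp [List.getElem?_eq_getElem hklt]

-- ===== VERDICT (by name: the statement is the Claim_ definition above) =====
theorem get_raw_text_spec : Claim_equal_get_raw_text := by
  intro q c d _hdom hpre
  unfold Spec_get_raw_text get_raw_text get_raw_text_alt
  rcases hpre with hq | hc
  · rw [PySem.List.foldl_append_singleton_eq_map, List.nil_append]
    exact List.map_congr_left (fun i _ => pv_body_eq q c d hq i)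
  · subst hc; rfl
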